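-- pv_equiv track=rewrite | github.com/samialabed/BoGraph | autorocks/optimizer/bograph/bobn_utils.py | _generate_all_pairs
-- ===== SOURCE A (Python) =====
-- from typing import Mapping, Sequence, Set
--
-- def _generate_all_pairs(parameter_nodes: Set[str], include_self: bool = False):
--     """Generates all combination of paris in the set."""
--     all_params_pair = set()
--     for p1 in parameter_nodes:
--         for p2 in parameter_nodes:
--             if not include_self and p1 == p2:
--                 continue
--             all_params_pair.add(tuple(sorted((p1, p2))))
--
--     return all_params_pair
-- ===== SOURCE B (Python) =====
-- def _generate_all_pairs(parameter_nodes, include_self=False):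
--     """Generates all combination of pairs in the set (triangular scan:
--     each unordered pair is visited exactly once, so no p1 == p2 test and
--     no per-pair sorted() call are needed)."""
--     items = list(parameter_nodes)
--     pairs = set()
--     for i, a in enumerate(items):
--         for b in items[i:] if include_self else items[i + 1:]:
--             pairs.add((a, b) if a <= b else (b, a))
--     return pairs
-- ===== Notes on version B (the rewrite author's own statement) =====
-- stated objective: faster
-- what changed: Replaces A's full n-by-n double scan over the set (with a p1==p2 skip and a sorted() call per ordered pair) by a one-sided triangular scan over an indexed list (each unordered pair visited once via items[i:] / items[i+1:], ordered by a single comparison), so half the iterations and no duplicate insertions into the result set.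
import Mathlib
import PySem

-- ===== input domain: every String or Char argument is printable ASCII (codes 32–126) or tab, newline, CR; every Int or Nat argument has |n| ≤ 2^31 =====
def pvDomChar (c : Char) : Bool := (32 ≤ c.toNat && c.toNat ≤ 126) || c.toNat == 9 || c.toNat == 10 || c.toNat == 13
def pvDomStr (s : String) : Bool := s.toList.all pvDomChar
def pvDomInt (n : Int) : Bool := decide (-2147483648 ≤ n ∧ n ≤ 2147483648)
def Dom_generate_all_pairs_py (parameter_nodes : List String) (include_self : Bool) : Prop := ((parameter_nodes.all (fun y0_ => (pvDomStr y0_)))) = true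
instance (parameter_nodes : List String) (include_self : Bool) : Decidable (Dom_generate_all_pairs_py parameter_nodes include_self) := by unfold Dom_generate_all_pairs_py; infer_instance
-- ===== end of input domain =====

-- B replaces A's full n×n double scan (p1==p2 skip + a sort per ordered pair) by a
-- one-sided triangular scan over the indexed list, visiting each unordered pair once.

-- ===== PORT A =====
-- tuple(sorted((p1, p2))) on exactly two strings: exact (Lean's String ≤ is Python's
-- lexicographic code-point order on the ASCII domain).
def pvSortedPairA (p1 p2 : String) : String × String :=
  if p1 ≤ p2 then (p1, p2) else (p2, p1)

def generate_all_pairs_py (parameter_nodes : List String) (include_self : Bool) : List (String × String) :=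
  parameter_nodes.foldl (fun acc p1 =>
    parameter_nodes.foldl (fun acc2 p2 =>
      if !include_self && p1 == p2 then acc2
      else PySem.Set.add acc2 (pvSortedPairA p1 p2)) acc) []

-- ===== PORT B =====
def generate_all_pairs_py_alt (parameter_nodes : List String) (include_self : Bool) : List (String × String) :=
  (PySem.List.enumerate parameter_nodes).foldl (fun acc ia =>
    (if include_self then PySem.List.slice parameter_nodes (some ia.1) none
     else PySem.List.slice parameter_nodes (some (ia.1 + 1)) none).foldl
      (fun acc2 b => PySem.Set.add acc2 (if ia.2 ≤ b then (ia.2, b) else (b, ia.2))) acc) []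

-- ===== PRECONDITION & SPEC =====
-- parameter_nodes ports a Python set[str]: its list representation holds the DISTINCT
-- elements (PySem.Set invariant). Pre_ excludes lists with duplicates, which encode no
-- Python set input (the set the tester builds from such a list is duplicate-free).
def Pre_generate_all_pairs_py (parameter_nodes : List String) (include_self : Bool) : Prop :=
  parameter_nodes.Nodup

instance (parameter_nodes : List String) (include_self : Bool) : Decidable (Pre_generate_all_pairs_py parameter_nodes include_self) := by unfold Pre_generate_all_pairs_py; infer_instance

def pvWitness_generate_all_pairs_py : List String × Bool := (["a", "b", "c"], false)

def Spec_generate_all_pairs_py (parameter_nodes : List String) (include_self : Bool) (out : List (String × String)) : Prop := out = generate_all_pairs_py_alt parameter_nodes include_self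
instance (parameter_nodes : List String) (include_self : Bool) (out : List (String × String)) : Decidable (Spec_generate_all_pairs_py parameter_nodes include_self out) := by unfold Spec_generate_all_pairs_py; infer_instance

-- ===== CLAIM (what is proved, stated in full; the proofs are below) =====
def Claim_equal_generate_all_pairs_py : Prop := ∀ (parameter_nodes : List String) (include_self : Bool), Dom_generate_all_pairs_py parameter_nodes include_self → Pre_generate_all_pairs_py parameter_nodes include_self → Spec_generate_all_pairs_py parameter_nodes include_self (generate_all_pairs_py parameter_nodes include_self)

-- ===== LEMMAS AND PROOFS =====

theorem pvSortedPairA_comm (a b : String) : pvSortedPairA a b = pvSortedPairA b a := by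
  unfold pvSortedPairA
  by_cases h : a ≤ b
  · by_cases h2 : b ≤ a
    · simp [h, h2, le_antisymm h h2]
    · simp [h, h2]
  · have h2 : b ≤ a := (le_total a b).resolve_left h
    simp [h, h2]

-- A's inner loop over elements whose pair is already present (or which are skipped)
-- leaves the accumulator unchanged.
theorem pvInnerA_const (inc : Bool) (p1 : String) (l : List String)
    (acc : List (String × String))
    (h : ∀ b ∈ l, (!inc && p1 == b) = true ∨ pvSortedPairA p1 b ∈ acc) :
    l.foldl (fun acc2 p2 =>
      if !inc && p1 == p2 then acc2
      else PySem.Set.add acc2 (pvSortedPairA p1 p2)) acc = acc := by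
  induction l with
  | nil => rfl
  | cons b t ih =>
    have hb := h b (by simp)
    have hstep : (if !inc && p1 == b then acc
        else PySem.Set.add acc (pvSortedPairA p1 b)) = acc := by
      rcases hb with hb | hb
      · simp [hb]
      · split
        · rfl
        · exact PySem.Set.add_of_mem hb
    simp only [List.foldl_cons, hstep]
    exact ih (fun b hb => h b (by simp [hb]))

-- A's inner loop over elements it never skips is a plain fold of Set.add.
theorem pvInnerA_add (inc : Bool) (p1 : String) (l : List String)
    (acc : List (String × String))
    (h : ∀ b ∈ l, (!inc && p1 == b) = false) :
    l.foldl (fun acc2 p2 =>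
      if !inc && p1 == p2 then acc2
      else PySem.Set.add acc2 (pvSortedPairA p1 p2)) acc
    = l.foldl (fun acc2 b => PySem.Set.add acc2 (pvSortedPairA p1 b)) acc := by
  apply PySem.List.foldl_congr_mem
  intro acc2 b hb
  simp [h b hb]

-- Main loop correspondence: with 'done' already processed and its pairs recorded in acc,
-- A's remaining outer loop (inner loop over the WHOLE list) equals B's remaining outer
-- loop (inner loop over the tail slice).
theorem pvMain (inc : Bool) (done rest : List String)
    (acc : List (String × String))
    (hnd : (done ++ rest).Nodup)
    (hinv : ∀ a ∈ done, ∀ b ∈ done ++ rest, (inc = true ∨ a ≠ b) →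
      pvSortedPairA a b ∈ acc) :
    rest.foldl (fun ac p1 =>
      (done ++ rest).foldl (fun acc2 p2 =>
        if !inc && p1 == p2 then acc2
        else PySem.Set.add acc2 (pvSortedPairA p1 p2)) ac) acc
    = (PySem.List.enumerate rest (done.length : Int)).foldl (fun ac ia =>
        (if inc then PySem.List.slice (done ++ rest) (some ia.1) none
         else PySem.List.slice (done ++ rest) (some (ia.1 + 1)) none).foldl
          (fun acc2 b => PySem.Set.add acc2 (if ia.2 ≤ b then (ia.2, b) else (b, ia.2))) ac) acc := by
  induction rest generalizing done acc with
  | nil => simp [PySem.List.enumerate_nil]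
  | cons r t ih =>
    -- distinctness facts
    have hndR : r ∉ done ∧ r ∉ t := by
      have hmid := List.nodup_middle.mp hnd
      have hr : r ∉ done ++ t := (List.nodup_cons.mp hmid).1
      exact ⟨fun h => hr (List.mem_append.mpr (Or.inl h)),
             fun h => hr (List.mem_append.mpr (Or.inr h))⟩
    -- B's first slice
    have hslice : PySem.List.slice (done ++ r :: t) (some ((done.length : Int))) none = r :: t := by
      rw [PySem.List.slice_from_natCast]
      simp
    have hslice1 : PySem.List.slice (done ++ r :: t) (some ((done.length : Int) + 1)) none = t := by
      have : ((done.length : Int) + 1) = ((done.length + 1 : Nat) : Int) := by push_cast; ring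
      rw [this, PySem.List.slice_from_natCast]
      have : done.length + 1 = (done ++ [r]).length := by simp
      rw [this, show done ++ r :: t = (done ++ [r]) ++ t by simp, List.drop_left]
    -- A's first inner loop, decomposed
    have hAfirst : (done ++ r :: t).foldl (fun acc2 p2 =>
        if !inc && r == p2 then acc2
        else PySem.Set.add acc2 (pvSortedPairA r p2)) acc
      = (if inc then r :: t else t).foldl
          (fun acc2 b => PySem.Set.add acc2 (pvSortedPairA r b)) acc := by
      rw [List.foldl_append]
      rw [pvInnerA_const inc r done acc (by
        intro b hb
        right
        rw [pvSortedPairA_comm]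
        exact hinv b hb r (by simp) (Or.inr (fun he => hndR.1 (he ▸ hb))))]
      cases inc with
      | true =>
        exact pvInnerA_add true r (r :: t) _ (by intro b _; simp)
      | false =>
        rw [List.foldl_cons]
        rw [if_pos (by simp)]
        exact pvInnerA_add false r t _ (by
          intro b hb
          have hne : (r == b) = false := by
            have : r ≠ b := fun he => hndR.2 (he ▸ hb)
            simp [this]
          simp [hne])
    -- the two first iterations produce the same accumulator
    rw [List.foldl_cons, hAfirst, PySem.List.enumerate_cons, List.foldl_cons]
    have hBfirst : (if inc = true then PySem.List.slice (done ++ r :: t) (some ((done.length : Int))) none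
         else PySem.List.slice (done ++ r :: t) (some ((done.length : Int) + 1)) none).foldl
          (fun acc2 b => PySem.Set.add acc2 (if r ≤ b then (r, b) else (b, r))) acc
        = (if inc = true then r :: t else t).foldl
          (fun acc2 b => PySem.Set.add acc2 (pvSortedPairA r b)) acc := by
      cases inc with
      | true =>
        rw [if_pos rfl, if_pos rfl, hslice]
        rfl
      | false =>
        rw [if_neg (by simp), if_neg (by simp), hslice1]
        rfl
    rw [hBfirst]
    generalize hacc1 : (if inc = true then r :: t else t).foldl
        (fun acc2 b => PySem.Set.add acc2 (pvSortedPairA r b)) acc = acc1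
    -- apply the induction hypothesis with done' = done ++ [r]
    have hre : done ++ r :: t = (done ++ [r]) ++ t := by simp
    have hlen : ((done ++ [r]).length : Int) = (done.length : Int) + 1 := by
      have h : (done ++ [r]).length = done.length + 1 := by simp
      rw [h]
      push_cast
      ring
    have hmono : ∀ y ∈ acc, y ∈ acc1 := by
      intro y hy
      rw [← hacc1]
      exact (PySem.Set.mem_foldl_add _ _ _ _).mpr (Or.inl hy)
    have hnew : ∀ b, b ∈ (if inc = true then r :: t else t) → pvSortedPairA r b ∈ acc1 := by
      intro b hb
      rw [← hacc1]
      exact (PySem.Set.mem_foldl_add _ _ _ _).mpr (Or.inr ⟨b, hb, rfl⟩)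
    have := ih (done ++ [r]) acc1 (by rw [← hre]; exact hnd) (by
      intro a ha b hb hcond
      rcases List.mem_append.mp ha with ha | ha
      · exact hmono _ (hinv a ha b (by rw [hre]; exact hb) hcond)
      · have haR : a = r := by simpa using ha
        subst haR
        rw [← hre] at hb
        rcases List.mem_append.mp hb with hb | hb
        · -- b among the previously done elements: its pair is in acc already
          apply hmono
          rw [pvSortedPairA_comm]
          exact hinv b hb a (by simp) (by
            rcases hcond with h | h
            · exact Or.inl h
            · exact Or.inr (Ne.symm h))
        · rcases List.mem_cons.mp hb with hb | hb
          · -- b = r: only reachable with include_self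
            subst hb
            apply hnew
            rcases hcond with h | h
            · simp [h]
            · exact absurd rfl h
          · -- b in the tail: added by the first inner loop
            apply hnew
            cases inc <;> simp [hb])
    rw [hlen, ← hre] at this
    exact this

-- ===== VERDICT (by name: the statement is the Claim_ definition above) =====
theorem generate_all_pairs_py_spec : Claim_equal_generate_all_pairs_py := by
  intro parameter_nodes include_self _hdom hpre
  show generate_all_pairs_py parameter_nodes include_self
      = generate_all_pairs_py_alt parameter_nodes include_self
  unfold generate_all_pairs_py generate_all_pairs_py_alt
  have := pvMain include_self [] parameter_nodes [] (by simpa using hpre) (by simp)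
  simpa using this
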